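-- pv_equiv track=rewrite | github.com/hex1n/sofarpc-cli | skills/call-rpc/tools/build_index.py | parse_generic_args
-- ===== SOURCE A (Python) =====
-- from typing import Dict, Iterable, List, Optional, Set, Tuple
--
-- def parse_generic_args(type_str: str) -> List[str]:
--     lt = type_str.find("<")
--     if lt == -1:
--         return []
--     depth = 0
--     buf: List[str] = []
--     out: List[str] = []
--     for ch in type_str[lt:]:
--         if ch == "<":
--             depth += 1
--             if depth > 1:
--                 buf.append(ch)
--             continue
--         if ch == ">":
--             depth -= 1
--             if depth == 0:
--                 token = "".join(buf).strip()
--                 if token: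
--                     out.append(token)
--                 return out
--             buf.append(ch)
--             continue
--         if depth == 1 and ch == ",":
--             token = "".join(buf).strip()
--             if token:
--                 out.append(token)
--             buf = []
--             continue
--         buf.append(ch)
--     return out
-- ===== SOURCE B (Python) =====
-- def parse_generic_args(type_str):
--     lt = type_str.find("<")
--     if lt == -1:
--         return []
--     # pass 1: collect the content of the outermost bracket group
--     inner = []
--     depth = 0
--     for ch in type_str[lt + 1:]:
--         if ch == ">" and depth == 0:
--             break
--         if ch == "<":
--             depth += 1
--         elif ch == ">":
--             depth -= 1
--         inner.append(ch)
--     # pass 2: split that content at top-level commas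
--     pieces = [[]]
--     depth = 0
--     for ch in inner:
--         if ch == "," and depth == 0:
--             pieces.append([])
--             continue
--         if ch == "<":
--             depth += 1
--         elif ch == ">":
--             depth -= 1
--         pieces[-1].append(ch)
--     return [t for t in ("".join(p).strip() for p in pieces) if t]
-- ===== Notes on version B (the rewrite author's own statement) =====
-- stated objective: alternative
-- what changed: A parses in one fused pass with an early return and a running token buffer; B first extracts the content of the outermost bracket group, then splits it at top-level commas in a second pass and strips/filters the pieces.
-- intended difference: On strings whose first opening angle bracket is never matched by a closing one and whose final top-level segment is non-blank, A silently drops that trailing argument (witness 'M<A': A gives the empty list) while B returns the argument text actually seen (['A']), the intended lenient recovery from the malformed string. — e.g. on parse_generic_args("M<A"): A returns [], B returns ["A"]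
import Mathlib
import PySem

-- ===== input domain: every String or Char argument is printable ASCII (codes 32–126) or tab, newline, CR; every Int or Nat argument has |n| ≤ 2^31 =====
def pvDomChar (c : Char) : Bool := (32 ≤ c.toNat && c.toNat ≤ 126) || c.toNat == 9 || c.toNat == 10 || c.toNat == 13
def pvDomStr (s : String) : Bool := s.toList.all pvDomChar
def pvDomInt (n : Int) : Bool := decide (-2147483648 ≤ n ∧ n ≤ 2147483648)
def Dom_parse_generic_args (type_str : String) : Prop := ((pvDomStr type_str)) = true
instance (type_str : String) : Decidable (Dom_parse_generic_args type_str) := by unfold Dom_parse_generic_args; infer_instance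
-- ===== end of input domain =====

-- B replaces A's fused single pass (early return, running token buffer) by an extract-then-split
-- decomposition of the same cost; on strings whose first angle bracket is never closed B keeps the
-- trailing argument that A silently drops (stated as the intended difference D_ below).

-- ===== PORT A =====
-- the for-loop over type_str[lt:] with state (depth, buf, out) and its early return
def pvLoopA : List Char → Int → List Char → List String → List String
  | [], _, _, out => out
  | ch :: rest, depth, buf, out =>
    if ch = '<' then
      pvLoopA rest (depth + 1) (if depth + 1 > 1 then buf ++ [ch] else buf) out
    else if ch = '>' then
      if depth - 1 = 0 then
        (let tok := PySem.Chars.strip buf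
         if tok = [] then out else out ++ [String.ofList tok])
      else pvLoopA rest (depth - 1) (buf ++ [ch]) out
    else if depth = 1 ∧ ch = ',' then
      pvLoopA rest depth []
        (let tok := PySem.Chars.strip buf
         if tok = [] then out else out ++ [String.ofList tok])
    else pvLoopA rest depth (buf ++ [ch]) out

def parse_generic_args (type_str : String) : List String :=
  let lt := PySem.Str.find type_str "<"
  if lt = -1 then []
  else pvLoopA (PySem.Str.slice type_str (some lt) none).toList 0 [] []

-- ===== PORT B =====
-- pass 1: content of the outermost bracket group (to the matching '>' or to the end)
def pvInnerB : List Char → Int → List Char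
  | [], _ => []
  | ch :: rest, depth =>
    if ch = '>' ∧ depth = 0 then []
    else ch :: pvInnerB rest (if ch = '<' then depth + 1 else if ch = '>' then depth - 1 else depth)

-- pieces[-1].append(ch)
def pvAppendLast : List (List Char) → Char → List (List Char)
  | [], c => [[c]]
  | [p], c => [p ++ [c]]
  | p :: q :: ps, c => p :: pvAppendLast (q :: ps) c

-- pass 2 loop body: split at top-level commas
def pvSplitStep (st : List (List Char) × Int) (ch : Char) : List (List Char) × Int :=
  if ch = ',' ∧ st.2 = 0 then (st.1 ++ [[]], st.2)
  else
    let d' := if ch = '<' then st.2 + 1 else if ch = '>' then st.2 - 1 else st.2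
    (pvAppendLast st.1 ch, d')

-- final comprehension: strip each piece, keep the non-empty ones
def pvEmitB (pieces : List (List Char)) : List String :=
  pieces.filterMap (fun p =>
    let t := PySem.Chars.strip p
    if t = [] then none else some (String.ofList t))

def parse_generic_args_alt (type_str : String) : List String :=
  let lt := PySem.Str.find type_str "<"
  if lt = -1 then []
  else
    let inner := pvInnerB (PySem.Str.slice type_str (some (lt + 1)) none).toList 0
    pvEmitB (inner.foldl pvSplitStep ([[]], 0)).1

-- ===== PRECONDITION & SPEC =====
-- D_ helpers: closed-form positional facts about the input (bracket level = running count
-- of '<' minus '>'; a close / top-level comma is a character at level 0 after the first '<')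
-- the positions of r at which character c occurs at bracket level 0
def pvTop (r : List Char) (c : Char) : List Nat :=
  (List.range r.length).filter fun j => r.getD j ' ' == c && (r.take j).count '<' == (r.take j).count '>' 
-- the characters after the first '<'
def pvAfterLT (type_str : String) : List Char :=
  (type_str.toList.dropWhile (fun c => c ≠ '<')).tail

-- On strings whose first opening angle bracket is never matched by a closing one and whose final
-- top-level segment is non-blank, A silently drops that trailing argument while B returns it;
-- returning the argument text actually seen is the intended lenient recovery from the malformed string.
def D_parse_generic_args (type_str : String) : Prop :=
  '<' ∈ type_str.toList ∧ pvTop (pvAfterLT type_str) '>' = [] ∧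
  PySem.Chars.strip ((pvAfterLT type_str).drop
    ((pvTop (pvAfterLT type_str) ',').foldl (fun a k => max a (k + 1)) 0)) ≠ []
instance (type_str : String) : Decidable (D_parse_generic_args type_str) := by
  unfold D_parse_generic_args; infer_instance

def Spec_parse_generic_args (type_str : String) (out : List String) : Prop :=
  ¬ D_parse_generic_args type_str → out = parse_generic_args_alt type_str
instance (type_str : String) (out : List String) : Decidable (Spec_parse_generic_args type_str out) := by
  unfold Spec_parse_generic_args; infer_instance

def pvDiffWitness_parse_generic_args : String := "M<A"
def pvDiffWitnessOut_parse_generic_args : (List String) × (List String) := ([], ["A"])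

-- ===== CLAIM (what is proved, stated in full; the proofs are below) =====
def Claim_unchanged_parse_generic_args : Prop := ∀ (type_str : String), Dom_parse_generic_args type_str → Spec_parse_generic_args type_str (parse_generic_args type_str)
def Claim_changed_parse_generic_args : Prop := Dom_parse_generic_args (pvDiffWitness_parse_generic_args) ∧ D_parse_generic_args (pvDiffWitness_parse_generic_args) ∧ parse_generic_args (pvDiffWitness_parse_generic_args) = pvDiffWitnessOut_parse_generic_args.1 ∧ parse_generic_args_alt (pvDiffWitness_parse_generic_args) = pvDiffWitnessOut_parse_generic_args.2 ∧ pvDiffWitnessOut_parse_generic_args.1 ≠ pvDiffWitnessOut_parse_generic_args.2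
def Claim_exact_parse_generic_args : Prop := ∀ (type_str : String), Dom_parse_generic_args type_str → D_parse_generic_args type_str → parse_generic_args type_str ≠ parse_generic_args_alt type_str

-- ===== LEMMAS AND PROOFS =====

-- proof-side scan: the segment after the last top-level comma, or none if the group closes
def pvOpenTail : List Char → Int → List Char → Option (List Char)
  | [], _, buf => some buf
  | ch :: rest, d, buf =>
    if ch = '>' ∧ d = 0 then none
    else if ch = ',' ∧ d = 0 then pvOpenTail rest d []
    else pvOpenTail rest (if ch = '<' then d + 1 else if ch = '>' then d - 1 else d) (buf ++ [ch])

def pvTailBad : Option (List Char) → Bool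
  | none => false
  | some t => !(PySem.Chars.strip t).isEmpty

def pvDelta (ch : Char) : Int := if ch = '<' then 1 else if ch = '>' then -1 else 0

def pvLvl (r : List Char) (j : Nat) : Int := ((r.take j).count '<' : Int) - (r.take j).count '>'

-- depth-relative top-level-occurrence tests used by the induction
def pvCloseAt (rest : List Char) (d : Int) (j : Nat) : Bool :=
  decide (j < rest.length) && (rest.getD j ' ' == '>') && (d + pvLvl rest j == 0)
def pvCommaAt (rest : List Char) (d : Int) (j : Nat) : Bool :=
  decide (j < rest.length) && (rest.getD j ' ' == ',') && (d + pvLvl rest j == 0)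

theorem pvTop_mem_close (r : List Char) (j : Nat) :
    j ∈ pvTop r '>' ↔ pvCloseAt r 0 j = true := by
  simp only [pvTop, pvCloseAt, pvLvl, List.mem_filter, List.mem_range, Bool.and_eq_true,
    beq_iff_eq, decide_eq_true_eq, zero_add]
  constructor
  · rintro ⟨h1, h2, h3⟩
    exact ⟨⟨h1, h2⟩, by omega⟩
  · rintro ⟨⟨h1, h2⟩, h3⟩
    exact ⟨h1, h2, by omega⟩

theorem pvTop_mem_comma (r : List Char) (j : Nat) :
    j ∈ pvTop r ',' ↔ pvCommaAt r 0 j = true := by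
  simp only [pvTop, pvCommaAt, pvLvl, List.mem_filter, List.mem_range, Bool.and_eq_true,
    beq_iff_eq, decide_eq_true_eq, zero_add]
  constructor
  · rintro ⟨h1, h2, h3⟩
    exact ⟨⟨h1, h2⟩, by omega⟩
  · rintro ⟨⟨h1, h2⟩, h3⟩
    exact ⟨h1, h2, by omega⟩

theorem pvTopGt_nil (rest : List Char) :
    pvTop rest '>' = [] ↔ ∀ j, pvCloseAt rest 0 j = false := by
  rw [List.eq_nil_iff_forall_not_mem]
  constructor
  · intro h j
    by_cases hc : pvCloseAt rest 0 j = true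
    · exact absurd ((pvTop_mem_close rest j).mpr hc) (h j)
    · exact eq_false_of_ne_true hc
  · intro h j hm
    have hc := (pvTop_mem_close rest j).mp hm
    rw [h j] at hc
    cases hc

theorem pvFold_ge (C : List Nat) (a : Nat) : a ≤ C.foldl (fun a k => max a (k + 1)) a := by
  induction C generalizing a with
  | nil => simp
  | cons k C ih => exact le_trans (le_max_left a (k + 1)) (ih _)

theorem pvFold_mem : ∀ (C : List Nat) (a j : Nat), j ∈ C →
    j + 1 ≤ C.foldl (fun a k => max a (k + 1)) a := by
  intro C
  induction C with
  | nil => intro a j h; cases h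
  | cons k C ih =>
    intro a j h
    rcases List.mem_cons.mp h with rfl | h
    · exact le_trans (le_max_right a (j + 1)) (pvFold_ge C _)
    · exact ih _ _ h

theorem pvFold_cases (C : List Nat) (a : Nat) :
    C.foldl (fun a k => max a (k + 1)) a = a ∨
      ∃ j ∈ C, C.foldl (fun a k => max a (k + 1)) a = j + 1 := by
  induction C generalizing a with
  | nil => exact Or.inl rfl
  | cons k C ih =>
    rcases ih (max a (k + 1)) with h | ⟨j, hj, hje⟩
    · rw [List.foldl_cons, h]
      rcases Nat.le_total (k + 1) a with hka | hka
      · exact Or.inl (by omega)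
      · exact Or.inr ⟨k, List.mem_cons_self, by omega⟩
    · exact Or.inr ⟨j, List.mem_cons_of_mem _ hj, by rw [List.foldl_cons]; exact hje⟩

theorem pvLvl_succ (ch : Char) (r : List Char) (j : Nat) :
    pvLvl (ch :: r) (j + 1) = pvDelta ch + pvLvl r j := by
  simp only [pvLvl, List.take_succ_cons, List.count_cons, pvDelta]
  by_cases h1 : ch = '<' <;> by_cases h2 : ch = '>' <;>
    simp [h1, h2] <;> omega

theorem pvLvl_zero (r : List Char) : pvLvl r 0 = 0 := by simp [pvLvl]

theorem pvCloseAt_succ (ch : Char) (r : List Char) (d : Int) (j : Nat) :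
    pvCloseAt (ch :: r) d (j + 1) = pvCloseAt r (d + pvDelta ch) j := by
  simp [pvCloseAt, pvLvl_succ, add_assoc]

theorem pvCommaAt_succ (ch : Char) (r : List Char) (d : Int) (j : Nat) :
    pvCommaAt (ch :: r) d (j + 1) = pvCommaAt r (d + pvDelta ch) j := by
  simp [pvCommaAt, pvLvl_succ, add_assoc]

theorem pvCloseAt_zero (ch : Char) (r : List Char) (d : Int) :
    pvCloseAt (ch :: r) d 0 = true ↔ (ch = '>' ∧ d = 0) := by
  simp [pvCloseAt, pvLvl_zero]

theorem pvCommaAt_zero (ch : Char) (r : List Char) (d : Int) :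
    pvCommaAt (ch :: r) d 0 = true ↔ (ch = ',' ∧ d = 0) := by
  simp [pvCommaAt, pvLvl_zero]

theorem pvStrip_nil_iff (t : List Char) :
    PySem.Chars.strip t = [] ↔ ∀ c ∈ t, PySem.Chars.isspace c = true := by
  simp only [PySem.Chars.strip, PySem.Chars.rstrip, PySem.Chars.lstrip,
    List.reverse_eq_nil_iff, List.dropWhile_eq_nil_iff, List.mem_reverse]
  constructor
  · intro h c hc
    rw [← List.takeWhile_append_dropWhile (p := PySem.Chars.isspace) (l := t)] at hc
    rcases List.mem_append.mp hc with hc | hc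
    · exact List.mem_takeWhile_imp hc
    · exact h c hc
  · intro h c hc
    exact h c (List.dropWhile_sublist _ |>.mem hc)

theorem pvIfChain_eq_delta (ch : Char) (d : Int) :
    (if ch = '<' then d + 1 else if ch = '>' then d - 1 else d) = d + pvDelta ch := by
  simp only [pvDelta]
  split_ifs <;> omega

theorem pvTailBad_some_iff (buf : List Char) :
    pvTailBad (some buf) = true ↔ ∃ c ∈ buf, PySem.Chars.isspace c = false := by
  have h1 : pvTailBad (some buf) = true ↔ ¬ (PySem.Chars.strip buf = []) := by
    simp [pvTailBad]
  rw [h1, pvStrip_nil_iff]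
  constructor
  · intro h
    by_contra hc
    push_neg at hc
    exact h (fun c hcm => by simpa using hc c hcm)
  · rintro ⟨c, hcm, hcs⟩ hall
    rw [hall c hcm] at hcs
    cases hcs

theorem pvDropM_iff (rest : List Char) :
    PySem.Chars.strip (rest.drop ((pvTop rest ',').foldl (fun a k => max a (k + 1)) 0)) ≠ [] ↔
    (∃ i, i < rest.length ∧ PySem.Chars.isspace (rest.getD i ' ') = false ∧
      ∀ j, i ≤ j → pvCommaAt rest 0 j = false) := by
  constructor
  · intro h
    obtain ⟨c, hcm, hcs⟩ : ∃ c ∈ rest.drop ((pvTop rest ',').foldl (fun a k => max a (k + 1)) 0),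
        PySem.Chars.isspace c = false := by
      by_contra hc
      push_neg at hc
      exact h ((pvStrip_nil_iff _).mpr (fun c hcm => by simpa using hc c hcm))
    obtain ⟨k, hk, hke⟩ := List.mem_iff_getElem.mp hcm
    have hlen := hk
    rw [List.length_drop] at hlen
    refine ⟨(pvTop rest ',').foldl (fun a k => max a (k + 1)) 0 + k, by omega, ?_, ?_⟩
    · rw [List.getElem_drop] at hke
      rw [List.getD_eq_getElem _ _ (by omega : (pvTop rest ',').foldl (fun a k => max a (k + 1)) 0 + k < rest.length)]
      rw [hke]
      exact hcs
    · intro j hj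
      by_cases hcc : pvCommaAt rest 0 j = true
      · have := pvFold_mem (pvTop rest ',') 0 j ((pvTop_mem_comma rest j).mpr hcc)
        omega
      · exact eq_false_of_ne_true hcc
  · rintro ⟨i, hi, hns, hnoc⟩
    have hMle : (pvTop rest ',').foldl (fun a k => max a (k + 1)) 0 ≤ i := by
      rcases pvFold_cases (pvTop rest ',') 0 with h0 | ⟨j, hj, hje⟩
      · omega
      · have hcc := (pvTop_mem_comma rest j).mp hj
        by_cases hij : i ≤ j
        · rw [hnoc j hij] at hcc
          cases hcc
        · omega
    intro hnil
    have hall := (pvStrip_nil_iff _).mp hnil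
    have hmem : rest.getD i ' ' ∈ rest.drop ((pvTop rest ',').foldl (fun a k => max a (k + 1)) 0) := by
      rw [List.getD_eq_getElem _ _ hi]
      exact List.mem_iff_getElem.mpr ⟨i - (pvTop rest ',').foldl (fun a k => max a (k + 1)) 0,
        by rw [List.length_drop]; omega,
        by rw [List.getElem_drop]; congr 1; omega⟩
    rw [hall _ hmem] at hns
    cases hns

-- proof-side pass 1 that also reports whether the matching '>' was found
def pvExtract : List Char → Int → List Char × Bool
  | [], _ => ([], false)
  | ch :: rest, depth =>
    if ch = '>' ∧ depth = 0 then ([], true)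
    else
      let d' := if ch = '<' then depth + 1 else if ch = '>' then depth - 1 else depth
      let r := pvExtract rest d'
      (ch :: r.1, r.2)

-- proof-side split of a char list at depth-0 commas, built front-to-back
def pvSplitD : List Char → Int → List (List Char)
  | [], _ => [[]]
  | ch :: rest, d =>
    if ch = ',' ∧ d = 0 then [] :: pvSplitD rest d
    else
      let d' := if ch = '<' then d + 1 else if ch = '>' then d - 1 else d
      match pvSplitD rest d' with
      | [] => [[ch]]
      | p :: ps => (ch :: p) :: ps

def pvConsHead (buf : List Char) : List (List Char) → List (List Char)
  | [] => [buf]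
  | p :: ps => (buf ++ p) :: ps

theorem pvInnerB_eq (cs : List Char) (d : Int) : pvInnerB cs d = (pvExtract cs d).1 := by
  induction cs generalizing d with
  | nil => simp [pvInnerB, pvExtract]
  | cons ch rest ih =>
    simp only [pvInnerB, pvExtract]
    split
    · rfl
    · simp [ih]

theorem pvSplitD_ne_nil (cs : List Char) (d : Int) : pvSplitD cs d ≠ [] := by
  cases cs with
  | nil => simp [pvSplitD]
  | cons ch rest =>
    simp only [pvSplitD]
    split
    · simp
    · split <;> simp

theorem pvConsHead_nil (ps : List (List Char)) (h : ps ≠ []) : pvConsHead [] ps = ps := by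
  cases ps with
  | nil => exact absurd rfl h
  | cons p ps => simp [pvConsHead]

theorem pvGetLastD_getLast (ps : List (List Char)) (h : ps ≠ []) :
    ps.getLastD [] = ps.getLast h := by
  rw [List.getLastD_eq_getLast?, List.getLast?_eq_some_getLast h]; rfl

-- main invariant: A's fused loop at depth d+1 computes extract-then-split, dropping the
-- last piece when the matching '>' was not found
theorem pvLoopA_eq (cs : List Char) (d : Int) (buf : List Char) (out : List String) (hd : 0 ≤ d) :
    pvLoopA cs (d + 1) buf out =
      out ++ pvEmitB (if (pvExtract cs d).2
        then pvConsHead buf (pvSplitD (pvExtract cs d).1 d)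
        else (pvConsHead buf (pvSplitD (pvExtract cs d).1 d)).dropLast) := by
  induction cs generalizing d buf out with
  | nil => simp [pvLoopA, pvExtract, pvSplitD, pvConsHead, pvEmitB]
  | cons ch rest ih =>
    by_cases hlt : ch = '<'
    · subst hlt
      have c1 : d + 1 + 1 > 1 := by omega
      have L : pvLoopA ('<' :: rest) (d + 1) buf out
          = pvLoopA rest (d + 1 + 1) (buf ++ ['<']) out := by
        simp [pvLoopA, c1]
      rw [L, show d + 1 + 1 = (d + 1) + 1 from rfl,
        ih (d + 1) (buf ++ ['<']) out (by omega)]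
      rcases hsp : pvSplitD (pvExtract rest (d + 1)).1 (d + 1) with _ | ⟨p, ps⟩
      · exact absurd hsp (pvSplitD_ne_nil _ _)
      · simp [pvExtract, pvSplitD, hsp, pvConsHead]
    · by_cases hgt : ch = '>'
      · subst hgt
        by_cases hd0 : d = 0
        · subst hd0
          have L : pvLoopA ('>' :: rest) (0 + 1) buf out
              = (if PySem.Chars.strip buf = [] then out
                 else out ++ [String.ofList (PySem.Chars.strip buf)]) := by
            simp [pvLoopA]
          rw [L]
          simp [pvExtract, pvSplitD, pvConsHead, pvEmitB]
          split <;> simp_all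
        · have c2 : ¬ (d + 1 = 1 ∧ ('>' : Char) = ',') := by simp
          have L : pvLoopA ('>' :: rest) (d + 1) buf out
              = pvLoopA rest (d + 1 - 1) (buf ++ ['>']) out := by
            simp [pvLoopA, hd0]
          rw [L, show d + 1 - 1 = (d - 1) + 1 from by omega,
            ih (d - 1) (buf ++ ['>']) out (by omega)]
          rcases hsp : pvSplitD (pvExtract rest (d - 1)).1 (d - 1) with _ | ⟨p, ps⟩
          · exact absurd hsp (pvSplitD_ne_nil _ _)
          · simp [pvExtract, pvSplitD, hd0, hsp, pvConsHead]
      · by_cases hcm : ch = ',' ∧ d = 0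
        · obtain ⟨hc1, hc2⟩ := hcm; subst hc1; subst hc2
          have L : pvLoopA (',' :: rest) (0 + 1) buf out
              = pvLoopA rest (0 + 1) []
                  (if PySem.Chars.strip buf = [] then out
                   else out ++ [String.ofList (PySem.Chars.strip buf)]) := by
            simp [pvLoopA]
          rw [L, ih 0 [] _ (le_refl 0)]
          have hps := pvSplitD_ne_nil (pvExtract rest 0).1 0
          rcases hsp : pvSplitD (pvExtract rest 0).1 0 with _ | ⟨p, ps⟩
          · exact absurd hsp hps
          · rcases hcl : (pvExtract rest 0).2 with _ | _
            · simp only [pvExtract, if_false, Bool.false_eq_true, pvConsHead,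
                pvEmitB, List.nil_append]
              split <;> simp_all [pvSplitD, pvEmitB, pvConsHead]
            · simp only [pvExtract, if_true, pvConsHead, pvEmitB,
                List.nil_append]
              split <;> simp_all [pvSplitD, pvEmitB, pvConsHead]
        · have c1 : ¬ (d + 1 = 1 ∧ ch = ',') := by
            rintro ⟨h1, h2⟩; exact hcm ⟨h2, by omega⟩
          have c3 : ¬ (ch = ',' ∧ d = 0) := hcm
          have L : pvLoopA (ch :: rest) (d + 1) buf out
              = pvLoopA rest (d + 1) (buf ++ [ch]) out := by
            simp [pvLoopA, hlt, hgt]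
            intro h1 h2
            exact absurd ⟨h2, h1⟩ hcm
          rw [L, ih d (buf ++ [ch]) out hd]
          rcases hsp : pvSplitD (pvExtract rest d).1 d with _ | ⟨p, ps⟩
          · exact absurd hsp (pvSplitD_ne_nil _ _)
          · simp [pvExtract, pvSplitD, hlt, hgt, c3, hsp, pvConsHead]

theorem pvAppendLast_eq (front : List (List Char)) (lastp : List Char) (c : Char) :
    pvAppendLast (front ++ [lastp]) c = front ++ [lastp ++ [c]] := by
  induction front with
  | nil => simp [pvAppendLast]
  | cons p front ih =>
    cases front with
    | nil => simp [pvAppendLast]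
    | cons q front => simpa [pvAppendLast] using ih

-- B's in-place split loop computes pvSplitD
theorem pvFoldSplit_eq (cs : List Char) (d : Int) (front : List (List Char)) (lastp : List Char) :
    (cs.foldl pvSplitStep (front ++ [lastp], d)).1 = front ++ pvConsHead lastp (pvSplitD cs d) := by
  induction cs generalizing d front lastp with
  | nil => simp [pvSplitD, pvConsHead]
  | cons ch rest ih =>
    simp only [List.foldl_cons, pvSplitStep, pvSplitD]
    by_cases hc : ch = ',' ∧ d = 0
    · rw [if_pos hc, if_pos hc]
      rw [List.append_assoc] at *
      have := ih d (front ++ [lastp]) []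
      rw [List.append_assoc] at this
      rw [this]
      have hps := pvSplitD_ne_nil rest d
      rcases hsp : pvSplitD rest d with _ | ⟨p, ps⟩
      · exact absurd hsp hps
      · simp [pvConsHead]
    · rw [if_neg hc, if_neg hc]
      rw [pvAppendLast_eq]
      rw [ih _ front (lastp ++ [ch])]
      rcases hsp : pvSplitD rest (if ch = '<' then d + 1 else if ch = '>' then d - 1 else d)
        with _ | ⟨p, ps⟩
      · exact absurd hsp (pvSplitD_ne_nil _ _)
      · simp [pvConsHead]

-- D_'s scan characterised by pvExtract/pvSplitD
theorem pvOpenTail_eq (cs : List Char) (d : Int) (buf : List Char) :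
    pvOpenTail cs d buf =
      if (pvExtract cs d).2 then none
      else some ((pvConsHead buf (pvSplitD (pvExtract cs d).1 d)).getLastD []) := by
  induction cs generalizing d buf with
  | nil => simp [pvOpenTail, pvExtract, pvSplitD, pvConsHead]
  | cons ch rest ih =>
    by_cases hcl : ch = '>' ∧ d = 0
    · obtain ⟨h1, h2⟩ := hcl; subst h1; subst h2
      simp [pvOpenTail, pvExtract]
    · by_cases hcm : ch = ',' ∧ d = 0
      · obtain ⟨h1, h2⟩ := hcm; subst h1; subst h2
        have L : pvOpenTail (',' :: rest) 0 buf = pvOpenTail rest 0 [] := by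
          simp [pvOpenTail]
        rw [L, ih 0 []]
        have hps := pvSplitD_ne_nil (pvExtract rest 0).1 0
        rcases hsp : pvSplitD (pvExtract rest 0).1 0 with _ | ⟨p, ps⟩
        · exact absurd hsp hps
        · have h2 : pvExtract (',' :: rest) 0 = (',' :: (pvExtract rest 0).1, (pvExtract rest 0).2) := by
            simp [pvExtract]
          rw [h2]
          rcases hcl2 : (pvExtract rest 0).2 with _ | _
          · simp only [Bool.false_eq_true, if_false]
            have hsd : pvSplitD (',' :: (pvExtract rest 0).1) 0
                = [] :: pvSplitD (pvExtract rest 0).1 0 := by simp [pvSplitD]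
            rw [hsd, hsp]
            simp [pvConsHead]
          · simp
      · have L : pvOpenTail (ch :: rest) d buf
            = pvOpenTail rest (if ch = '<' then d + 1 else if ch = '>' then d - 1 else d)
                (buf ++ [ch]) := by
          simp only [pvOpenTail, if_neg hcl, if_neg hcm]
        have h2 : pvExtract (ch :: rest) d
            = (ch :: (pvExtract rest (if ch = '<' then d + 1 else if ch = '>' then d - 1 else d)).1,
               (pvExtract rest (if ch = '<' then d + 1 else if ch = '>' then d - 1 else d)).2) := by
          simp only [pvExtract, if_neg hcl]
        rw [L, ih _ (buf ++ [ch]), h2]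
        rcases hsp : pvSplitD
            (pvExtract rest (if ch = '<' then d + 1 else if ch = '>' then d - 1 else d)).1
            (if ch = '<' then d + 1 else if ch = '>' then d - 1 else d) with _ | ⟨p, ps⟩
        · exact absurd hsp (pvSplitD_ne_nil _ _)
        · have hsd : pvSplitD (ch :: (pvExtract rest (if ch = '<' then d + 1 else if ch = '>' then d - 1 else d)).1) d
              = (ch :: p) :: ps := by
            simp only [pvSplitD, if_neg hcm, hsp]
          rw [hsd]
          simp [pvConsHead]

theorem pvEmitB_append (xs ys : List (List Char)) :
    pvEmitB (xs ++ ys) = pvEmitB xs ++ pvEmitB ys := by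
  simp [pvEmitB]

theorem pvMem_iff_find (type_str : String) :
    '<' ∈ type_str.toList ↔ PySem.Str.find type_str "<" ≠ -1 := by
  rw [PySem.Str.find_ne_neg_one_iff]
  constructor
  · intro hm
    obtain ⟨l1, l2, hl⟩ := List.append_of_mem hm
    exact ⟨l1, l2, by simp [hl]⟩
  · intro hinf
    exact hinf.subset (by simp)

theorem pvDropWhile_eq_drop (cs : List Char) : ∀ (k : Nat) (t : List Char),
    cs.drop k = '<' :: t → (∀ i < k, ¬ ['<'] <+: cs.drop i) →
    cs.dropWhile (fun c => c ≠ '<') = '<' :: t := by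
  induction cs with
  | nil =>
    intro k t hk _
    rw [List.drop_nil] at hk
    cases hk
  | cons c cs ih =>
    intro k t hk hmin
    cases k with
    | zero =>
      rw [List.drop_zero] at hk
      rw [hk]
      simp
    | succ k =>
      have hc : ¬ c = '<' := by
        intro hceq
        exact hmin 0 (Nat.succ_pos k) ⟨cs, by simp [hceq]⟩
      rw [List.dropWhile_cons_of_pos (by simpa using hc)]
      exact ih k t (by simpa using hk) (fun i hi => by simpa using hmin (i + 1) (by omega))

theorem pvAfterLT_eq (type_str : String) (h : ¬ PySem.Str.find type_str "<" = -1) :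
    pvAfterLT type_str
      = (PySem.Str.slice type_str (some (PySem.Str.find type_str "<" + 1)) none).toList := by
  have hnn : 0 ≤ PySem.Str.find type_str "<" := by
    have := PySem.Chars.neg_one_le_find type_str.toList "<".toList
    rw [← PySem.Str.find_eq] at this
    omega
  have h0 : 0 ≤ PySem.Chars.find type_str.toList "<".toList := by
    rw [← PySem.Str.find_eq]; exact hnn
  have hsp := PySem.Chars.find_spec h0
  obtain ⟨⟨t, ht⟩, hmin⟩ := hsp
  rw [← PySem.Str.find_eq] at ht hmin
  have ht' : type_str.toList.drop (PySem.Str.find type_str "<").toNat = '<' :: t := by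
    simpa using ht.symm
  have hs2 : (PySem.Str.slice type_str (some (PySem.Str.find type_str "<" + 1)) none).toList
      = type_str.toList.drop ((PySem.Str.find type_str "<").toNat + 1) := by
    rw [PySem.Str.toList_slice, PySem.Chars.slice_eq_listSlice,
      PySem.List.slice_from _ (by omega)]
    congr 1
    omega
  have htail : type_str.toList.drop ((PySem.Str.find type_str "<").toNat + 1) = t := by
    rw [← List.tail_drop, ht']
    rfl
  have hdw := pvDropWhile_eq_drop type_str.toList (PySem.Str.find type_str "<").toNat t ht'
    (fun i hi => by simpa using hmin i hi)
  unfold pvAfterLT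
  rw [hdw, hs2, htail]
  rfl

-- shared unfolding of both ports past the first '<'
theorem pv_ports_shape (type_str : String) (h : ¬ PySem.Str.find type_str "<" = -1) :
    ∃ rest : List Char,
      (PySem.Str.slice type_str (some (PySem.Str.find type_str "<" + 1)) none).toList = rest ∧
      parse_generic_args type_str
        = pvEmitB (if (pvExtract rest 0).2
            then pvSplitD (pvExtract rest 0).1 0
            else (pvSplitD (pvExtract rest 0).1 0).dropLast) ∧
      parse_generic_args_alt type_str = pvEmitB (pvSplitD (pvExtract rest 0).1 0) := by
  have hnn : 0 ≤ PySem.Str.find type_str "<" := by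
    have := PySem.Chars.neg_one_le_find type_str.toList "<".toList
    rw [← PySem.Str.find_eq] at this
    omega
  have h0 : 0 ≤ PySem.Chars.find type_str.toList "<".toList := by
    rw [← PySem.Str.find_eq]; exact hnn
  obtain ⟨rest, hrest⟩ :
      ∃ rest, type_str.toList.drop (PySem.Str.find type_str "<").toNat = '<' :: rest := by
    have hsp := (PySem.Chars.find_spec h0).1
    rw [← PySem.Str.find_eq] at hsp
    rcases hsp with ⟨t, ht⟩
    exact ⟨t, by simpa using ht.symm⟩
  have hs1 : (PySem.Str.slice type_str (some (PySem.Str.find type_str "<")) none).toList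
      = '<' :: rest := by
    rw [PySem.Str.toList_slice, PySem.Chars.slice_eq_listSlice,
      PySem.List.slice_from _ hnn, hrest]
  have hs2 : (PySem.Str.slice type_str (some (PySem.Str.find type_str "<" + 1)) none).toList
      = rest := by
    rw [PySem.Str.toList_slice, PySem.Chars.slice_eq_listSlice,
      PySem.List.slice_from _ (by omega)]
    have hn : (PySem.Str.find type_str "<" + 1).toNat
        = (PySem.Str.find type_str "<").toNat + 1 := by omega
    rw [hn, ← List.tail_drop, hrest]
    rfl
  refine ⟨rest, hs2, ?_, ?_⟩
  · simp only [parse_generic_args, if_neg h]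
    rw [hs1]
    have hstep : pvLoopA ('<' :: rest) 0 [] [] = pvLoopA rest (0 + 1) [] [] := by
      simp [pvLoopA]
    rw [hstep, pvLoopA_eq rest 0 [] [] (le_refl 0),
      pvConsHead_nil _ (pvSplitD_ne_nil _ _)]
    simp
  · simp only [parse_generic_args_alt, if_neg h]
    rw [hs2, pvInnerB_eq]
    have hfold := pvFoldSplit_eq (pvExtract rest 0).1 0 [] []
    simp only [List.nil_append] at hfold
    rw [hfold, pvConsHead_nil _ (pvSplitD_ne_nil _ _)]

theorem pvExtract_closed_iff (rest : List Char) (d : Int) :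
    (pvExtract rest d).2 = true ↔ ∃ j, pvCloseAt rest d j = true := by
  induction rest generalizing d with
  | nil =>
    simp [pvExtract, pvCloseAt]
  | cons ch r ih =>
    by_cases hc : ch = '>' ∧ d = 0
    · simp only [pvExtract, if_pos hc]
      exact iff_of_true trivial ⟨0, (pvCloseAt_zero ch r d).mpr hc⟩
    · have hE : (pvExtract (ch :: r) d).2 = (pvExtract r (d + pvDelta ch)).2 := by
        simp only [pvExtract, if_neg hc, pvIfChain_eq_delta]
      rw [hE, ih]
      constructor
      · rintro ⟨j, hj⟩
        exact ⟨j + 1, by rw [pvCloseAt_succ]; exact hj⟩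
      · rintro ⟨j, hj⟩
        cases j with
        | zero => exact absurd ((pvCloseAt_zero ch r d).mp hj) hc
        | succ j => exact ⟨j, by rwa [pvCloseAt_succ] at hj⟩


theorem pvOpenTail_bad_iff (rest : List Char) : ∀ (d : Int) (buf : List Char),
    (∀ j, pvCloseAt rest d j = false) →
    (pvTailBad (pvOpenTail rest d buf) = true ↔
      ((∃ i, i < rest.length ∧ PySem.Chars.isspace (rest.getD i ' ') = false ∧
          ∀ j, i ≤ j → pvCommaAt rest d j = false)
       ∨ ((∀ j, pvCommaAt rest d j = false) ∧ ∃ c ∈ buf, PySem.Chars.isspace c = false))) := by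
  induction rest with
  | nil =>
    intro d buf _
    rw [show pvOpenTail [] d buf = some buf from rfl, pvTailBad_some_iff]
    constructor
    · intro h
      exact Or.inr ⟨fun j => by simp [pvCommaAt], h⟩
    · rintro (⟨i, hi, _⟩ | ⟨_, h⟩)
      · simp at hi
      · exact h
  | cons ch r ih =>
    intro d buf hnc
    by_cases hcl : ch = '>' ∧ d = 0
    · exact absurd ((pvCloseAt_zero ch r d).mpr hcl) (by simp [hnc 0])
    · have hnc' : ∀ j, pvCloseAt r (d + pvDelta ch) j = false := by
        intro j
        rw [← pvCloseAt_succ]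
        exact hnc (j + 1)
      by_cases hcm : ch = ',' ∧ d = 0
      · -- top-level comma: buffer resets
        obtain ⟨hc1, hc2⟩ := hcm
        have hδ : d + pvDelta ch = d := by subst hc1; simp [pvDelta]
        have hL : pvOpenTail (ch :: r) d buf = pvOpenTail r d [] := by
          subst hc1 hc2
          simp [pvOpenTail]
        rw [hL, ih d [] (hδ ▸ hnc')]
        have hcomma0 : pvCommaAt (ch :: r) d 0 = true := (pvCommaAt_zero ch r d).mpr ⟨hc1, hc2⟩
        constructor
        · rintro (⟨i, hi, hns, hnoc⟩ | ⟨_, c, hc, _⟩)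
          · refine Or.inl ⟨i + 1, by simpa using hi, by simpa using hns, ?_⟩
            intro j hj
            cases j with
            | zero => omega
            | succ j => rw [pvCommaAt_succ, hδ]; exact hnoc j (by omega)
          · simp at hc
        · rintro (⟨i, hi, hns, hnoc⟩ | ⟨hall, _⟩)
          · cases i with
            | zero => rw [hnoc 0 (le_refl 0)] at hcomma0; cases hcomma0
            | succ i =>
              refine Or.inl ⟨i, by simpa using hi, by simpa using hns, ?_⟩
              intro j hj
              rw [← hδ, ← pvCommaAt_succ]
              exact hnoc (j + 1) (by omega)
          · rw [hall 0] at hcomma0; cases hcomma0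
      · -- ordinary character: appended to the buffer
        have hL : pvOpenTail (ch :: r) d buf
            = pvOpenTail r (d + pvDelta ch) (buf ++ [ch]) := by
          simp only [pvOpenTail, if_neg hcl, if_neg hcm, pvIfChain_eq_delta]
        have hcomma0 : pvCommaAt (ch :: r) d 0 = false := by
          rcases Bool.eq_false_or_eq_true (pvCommaAt (ch :: r) d 0) with h | h
          · exact absurd ((pvCommaAt_zero ch r d).mp h) hcm
          · exact h
        have hBiff : (∀ j, pvCommaAt (ch :: r) d j = false)
            ↔ (∀ j, pvCommaAt r (d + pvDelta ch) j = false) := by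
          constructor
          · intro h j; rw [← pvCommaAt_succ]; exact h (j + 1)
          · intro h j
            cases j with
            | zero => exact hcomma0
            | succ j => rw [pvCommaAt_succ]; exact h j
        rw [hL, ih (d + pvDelta ch) (buf ++ [ch]) hnc']
        constructor
        · rintro (⟨i, hi, hns, hnoc⟩ | ⟨hall, c, hc, hcs⟩)
          · refine Or.inl ⟨i + 1, by simpa using hi, by simpa using hns, ?_⟩
            intro j hj
            cases j with
            | zero => omega
            | succ j => rw [pvCommaAt_succ]; exact hnoc j (by omega)
          · rcases List.mem_append.mp hc with hc | hc
            · exact Or.inr ⟨hBiff.mpr hall, c, hc, hcs⟩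
            · -- c = ch: take i = 0 in the left disjunct
              refine Or.inl ⟨0, by simp, ?_, ?_⟩
              · simpa [List.mem_singleton.mp hc] using hcs
              · intro j _
                cases j with
                | zero => exact hcomma0
                | succ j => rw [pvCommaAt_succ]; exact hall j
        · rintro (⟨i, hi, hns, hnoc⟩ | ⟨hall, c, hc, hcs⟩)
          · cases i with
            | zero =>
              refine Or.inr ⟨?_, ch, by simp, by simpa using hns⟩
              intro j
              rw [← pvCommaAt_succ]
              exact hnoc (j + 1) (by omega)
            | succ i =>
              refine Or.inl ⟨i, by simpa using hi, by simpa using hns, ?_⟩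
              intro j hj
              rw [← pvCommaAt_succ]
              exact hnoc (j + 1) (by omega)
          · exact Or.inr ⟨hBiff.mp hall, c, List.mem_append_left _ hc, hcs⟩

-- ===== VERDICT (by name: the statements are the Claim_ definitions above) =====
theorem parse_generic_args_spec : Claim_unchanged_parse_generic_args := by
  intro type_str _ hnd
  by_cases h : PySem.Str.find type_str "<" = -1
  · simp only [parse_generic_args, parse_generic_args_alt]
    rw [if_pos h, if_pos h]
  · obtain ⟨rest, hs2, hA, hB⟩ := pv_ports_shape type_str h
    have hs3 : pvAfterLT type_str = rest := (pvAfterLT_eq type_str h).trans hs2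
    rw [hA, hB]
    rcases hcl : (pvExtract rest 0).2 with _ | _
    · -- not closed: ¬D_ says the trailing segment is blank
      have hncU : ∀ j, pvCloseAt rest 0 j = false := by
        intro j
        by_cases hb : pvCloseAt rest 0 j = true
        · have := (pvExtract_closed_iff rest 0).mpr ⟨j, hb⟩
          rw [hcl] at this
          cases this
        · exact eq_false_of_ne_true hb
      by_cases htb : pvTailBad (pvOpenTail rest 0 []) = true
      · -- then D_ would hold, contradicting hnd
        rcases (pvOpenTail_bad_iff rest 0 [] hncU).mp htb with ⟨i, hi, hns, hnoc⟩ | ⟨_, c, hc, _⟩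
        · refine absurd ⟨(pvMem_iff_find type_str).mpr h, ?_, ?_⟩ hnd
          · rw [hs3]; exact (pvTopGt_nil rest).mpr hncU
          · rw [hs3]; exact (pvDropM_iff rest).mpr ⟨i, hi, hns, hnoc⟩
        · simp at hc
      · have hD : pvTailBad (pvOpenTail rest 0 []) = false := eq_false_of_ne_true htb
        rw [pvOpenTail_eq, hcl, if_neg (by simp),
          pvConsHead_nil _ (pvSplitD_ne_nil _ _)] at hD
        set ps := pvSplitD (pvExtract rest 0).1 0 with hps
        have hpsne : ps ≠ [] := pvSplitD_ne_nil _ _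
        obtain ⟨lastp, hlp⟩ : ∃ x, ps.getLastD [] = x := ⟨_, rfl⟩
        rw [hlp] at hD
        have hstrip : PySem.Chars.strip lastp = [] := by
          simp only [pvTailBad, Bool.not_eq_false'] at hD
          simpa using hD
        have hsplit : ps.dropLast ++ [lastp] = ps := by
          rw [← hlp, pvGetLastD_getLast ps hpsne]
          exact List.dropLast_append_getLast hpsne
        conv_rhs => rw [← hsplit]
        rw [pvEmitB_append]
        simp [pvEmitB, hstrip]
    · simp

theorem parse_generic_args_changed : Claim_changed_parse_generic_args := by
  unfold Claim_changed_parse_generic_args; decide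

theorem parse_generic_args_tight : Claim_exact_parse_generic_args := by
  intro type_str _ hD hcontra
  obtain ⟨hmem, hTopNil, hStrip⟩ := hD
  have h : ¬ PySem.Str.find type_str "<" = -1 := (pvMem_iff_find type_str).mp hmem
  obtain ⟨rest, hs2, hA, hB⟩ := pv_ports_shape type_str h
  have hs3 : pvAfterLT type_str = rest := (pvAfterLT_eq type_str h).trans hs2
  rw [hs3] at hTopNil hStrip
  have hncU : ∀ j, pvCloseAt rest 0 j = false := (pvTopGt_nil rest).mp hTopNil
  obtain ⟨i, hi, hns, hnoc⟩ := (pvDropM_iff rest).mp hStrip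
  have hcl : (pvExtract rest 0).2 = false := by
    by_cases hc : (pvExtract rest 0).2 = true
    · obtain ⟨j, hj⟩ := (pvExtract_closed_iff rest 0).mp hc
      rw [hncU j] at hj
      cases hj
    · exact eq_false_of_ne_true hc
  have hb : pvTailBad (pvOpenTail rest 0 []) = true :=
    (pvOpenTail_bad_iff rest 0 [] hncU).mpr (Or.inl ⟨i, hi, hns, hnoc⟩)
  rw [pvOpenTail_eq, hcl, if_neg (by simp), pvConsHead_nil _ (pvSplitD_ne_nil _ _)] at hb
  set ps := pvSplitD (pvExtract rest 0).1 0 with hps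
  have hpsne : ps ≠ [] := pvSplitD_ne_nil _ _
  obtain ⟨lastp, hlp⟩ : ∃ x, ps.getLastD [] = x := ⟨_, rfl⟩
  rw [hlp] at hb
  have hstrip : PySem.Chars.strip lastp ≠ [] := by
    simp only [pvTailBad] at hb
    simpa using hb
  have hsplit : ps.dropLast ++ [lastp] = ps := by
    rw [← hlp, pvGetLastD_getLast ps hpsne]
    exact List.dropLast_append_getLast hpsne
  rw [hA, hB, hcl] at hcontra
  simp only [Bool.false_eq_true, if_false] at hcontra
  rw [← hsplit] at hcontra
  rw [List.dropLast_concat, pvEmitB_append] at hcontra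
  have hone : pvEmitB [lastp] = [String.ofList (PySem.Chars.strip lastp)] := by
    simp [pvEmitB, hstrip]
  rw [hone] at hcontra
  exact absurd (congrArg List.length hcontra) (by simp)
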